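-- pv_equiv track=rewrite | github.com/ptosco/rdkit | Scripts/gen_rdkit_stubs/__init__.py | protect_quoted_square_brackets_and_equals
-- ===== SOURCE A (Python) =====
-- PROTECTIONS = {
--     "[": "__OPEN_SQUARE_BRACKET_TAG__",
--     "]": "__CLOSE_SQUARE_BRACKET_TAG__",
--     "=": "__EQUALS_TAG__"
-- }
--
-- def protect_quoted_square_brackets_and_equals(arg):
--     open_quote = False
--     protected_arg = ""
--     for c in arg:
--         if c == "'":
--             open_quote ^= True
--         elif open_quote:
--             replacement = PROTECTIONS.get(c, None)
--             if replacement is not None: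
--                 c = replacement
--         protected_arg += c
--     return protected_arg
-- ===== SOURCE B (Python) =====
-- PROTECTIONS = {
--     "[": "__OPEN_SQUARE_BRACKET_TAG__",
--     "]": "__CLOSE_SQUARE_BRACKET_TAG__",
--     "=": "__EQUALS_TAG__"
-- }
--
-- def protect_quoted_square_brackets_and_equals(arg):
--     segments = arg.split("'")
--     out = []
--     for i, seg in enumerate(segments):
--         if i % 2 == 1:
--             seg = (seg.replace("[", PROTECTIONS["["])
--                       .replace("]", PROTECTIONS["]"])
--                       .replace("=", PROTECTIONS["="]))
--         out.append(seg)
--     return "'".join(out)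
-- ===== Notes on version B (the rewrite author's own statement) =====
-- stated objective: faster
-- what changed: Replaced the per-character quote-toggling state machine with a split-on-quote pass: odd-indexed segments (the inside-quote text) get the three replacements applied, then segments are rejoined with the quote character; the work moves into C-level str.split/replace/join instead of a per-character Python loop.
import Mathlib
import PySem

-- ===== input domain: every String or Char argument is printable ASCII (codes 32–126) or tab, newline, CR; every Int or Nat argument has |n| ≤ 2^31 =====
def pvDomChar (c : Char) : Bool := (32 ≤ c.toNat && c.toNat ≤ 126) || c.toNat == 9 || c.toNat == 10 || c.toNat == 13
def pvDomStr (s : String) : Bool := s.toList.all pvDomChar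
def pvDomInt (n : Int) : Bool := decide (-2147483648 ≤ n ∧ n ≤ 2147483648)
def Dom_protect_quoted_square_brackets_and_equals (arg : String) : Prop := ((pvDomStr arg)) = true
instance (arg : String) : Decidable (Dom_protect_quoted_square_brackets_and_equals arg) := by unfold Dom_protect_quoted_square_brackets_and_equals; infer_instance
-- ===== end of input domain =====

-- B replaces A's per-character quote-toggling state machine with split-on-quote /
-- transform-odd-segments / rejoin; a timing run measured B faster (C-level str ops).


-- ===== PORT A =====
-- module-level dict PROTECTIONS (keys are the 1-char strings A compares the iterated chars with)
def PROTECTIONS : PySem.Dict Char String :=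
  PySem.Dict.ofList
    [('[', "__OPEN_SQUARE_BRACKET_TAG__"),
     (']', "__CLOSE_SQUARE_BRACKET_TAG__"),
     ('=', "__EQUALS_TAG__")]

def protect_quoted_square_brackets_and_equals (arg : String) : String :=
  -- state = (open_quote, protected_arg); 'for c in arg' = fold over the chars
  let st := arg.toList.foldl
    (fun (st : Bool × List Char) c =>
      if c = '\'' then (!st.1, st.2 ++ [c])
      else if st.1 then
        match PySem.Dict.get? PROTECTIONS c with
        | some r => (st.1, st.2 ++ r.toList)
        | none   => (st.1, st.2 ++ [c])
      else (st.1, st.2 ++ [c]))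
    (false, [])
  String.ofList st.2

-- ===== PORT B =====
-- the three chained .replace calls of Source B on one segment
def pvRep3 (seg : List Char) : List Char :=
  PySem.Chars.replace
    (PySem.Chars.replace
      (PySem.Chars.replace seg ['['] "__OPEN_SQUARE_BRACKET_TAG__".toList)
      [']'] "__CLOSE_SQUARE_BRACKET_TAG__".toList)
    ['='] "__EQUALS_TAG__".toList

def protect_quoted_square_brackets_and_equals_alt (arg : String) : String :=
  let segments := PySem.Chars.splitOn arg.toList ['\'']
  let out := (PySem.List.enumerate segments 0).foldl
    (fun (acc : List (List Char)) p =>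
      acc ++ [if PySem.Int.mod p.1 2 == 1 then pvRep3 p.2 else p.2]) []
  String.ofList (PySem.Chars.join ['\''] out)

-- ===== PRECONDITION & SPEC =====
def Spec_protect_quoted_square_brackets_and_equals (arg : String) (out : String) : Prop := out = protect_quoted_square_brackets_and_equals_alt arg
instance (arg : String) (out : String) : Decidable (Spec_protect_quoted_square_brackets_and_equals arg out) := by unfold Spec_protect_quoted_square_brackets_and_equals; infer_instance

-- ===== CLAIM (what is proved, stated in full; the proofs are below) =====
def Claim_equal_protect_quoted_square_brackets_and_equals : Prop := ∀ (arg : String), Dom_protect_quoted_square_brackets_and_equals arg → Spec_protect_quoted_square_brackets_and_equals arg (protect_quoted_square_brackets_and_equals arg)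

-- ===== LEMMAS AND PROOFS =====

-- the per-character protection map, as a function
def pvProt (c : Char) : List Char :=
  if c = '[' then "__OPEN_SQUARE_BRACKET_TAG__".toList
  else if c = ']' then "__CLOSE_SQUARE_BRACKET_TAG__".toList
  else if c = '=' then "__EQUALS_TAG__".toList
  else [c]

theorem pvGet_PROTECTIONS (c : Char) :
    PySem.Dict.get? PROTECTIONS c =
      if c = '[' then some "__OPEN_SQUARE_BRACKET_TAG__"
      else if c = ']' then some "__CLOSE_SQUARE_BRACKET_TAG__"
      else if c = '=' then some "__EQUALS_TAG__"
      else none := by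
  have h : PROTECTIONS = PySem.Dict.mk
    [('[', "__OPEN_SQUARE_BRACKET_TAG__"),
     (']', "__CLOSE_SQUARE_BRACKET_TAG__"),
     ('=', "__EQUALS_TAG__")] := by decide
  rw [h]
  simp [PySem.Dict.get?_mk_cons]
  split_ifs <;> first | rfl | (subst_vars; simp_all)

-- A's loop as a structural recursion (result part of the state only)
def pvArec (b : Bool) : List Char → List Char
  | [] => []
  | c :: cs =>
    if c = '\'' then c :: pvArec (!b) cs
    else (if b then pvProt c else [c]) ++ pvArec b cs

theorem pvFoldA (l : List Char) (b : Bool) (acc : List Char) :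
    (l.foldl
      (fun (st : Bool × List Char) c =>
        if c = '\'' then (!st.1, st.2 ++ [c])
        else if st.1 then
          match PySem.Dict.get? PROTECTIONS c with
          | some r => (st.1, st.2 ++ r.toList)
          | none   => (st.1, st.2 ++ [c])
        else (st.1, st.2 ++ [c]))
      (b, acc)).2 = acc ++ pvArec b l := by
  induction l generalizing b acc with
  | nil => simp [pvArec]
  | cons c cs ih =>
    simp only [List.foldl_cons, pvArec]
    by_cases hq : c = '\''
    · simp [hq, ih]
    · rw [pvGet_PROTECTIONS]
      by_cases hb : b
      · by_cases h1 : c = '['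
        · simp [hq, hb, h1, ih, pvProt]
        · by_cases h2 : c = ']'
          · simp [hq, hb, h1, h2, ih, pvProt]
          · by_cases h3 : c = '='
            · simp [hq, hb, h1, h2, h3, ih, pvProt]
            · simp [hq, hb, h1, h2, h3, ih, pvProt]
      · simp [hq, hb, ih]

-- B's split, as a structural recursion with the current-segment accumulator
def pvSplit : List Char → List Char → List (List Char)
  | [], cur => [cur.reverse]
  | c :: rest, cur =>
    if c = '\'' then cur.reverse :: pvSplit rest []
    else pvSplit rest (c :: cur)

theorem pvSplit_ne_nil (l cur : List Char) : pvSplit l cur ≠ [] := by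
  induction l generalizing cur with
  | nil => simp [pvSplit]
  | cons c rest ih => by_cases h : c = '\'' <;> simp [pvSplit, h, ih]

theorem pvSplitOn_go (l : List Char) (fuel : Nat) (cur : List Char)
    (acc : List (List Char)) (hf : l.length ≤ fuel) :
    PySem.Chars.splitOn.go ['\''] fuel l cur acc = acc.reverse ++ pvSplit l cur := by
  induction l generalizing fuel cur acc with
  | nil =>
    cases fuel <;> simp [PySem.Chars.splitOn.go, pvSplit]
  | cons c rest ih =>
    cases fuel with
    | zero => simp at hf
    | succ f =>
      by_cases h : c = '\''
      · simp only [PySem.Chars.splitOn.go, pvSplit, h]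
        rw [if_pos (by simp [List.isPrefixOf])]
        simp only [List.length_cons, List.length_nil, List.drop_succ_cons, List.drop_zero]
        rw [ih f [] (cur.reverse :: acc) (by simpa using hf)]
        simp
      · simp only [PySem.Chars.splitOn.go, pvSplit, h]
        rw [if_neg (by simp [List.isPrefixOf]; exact fun hh => h hh.symm)]
        rw [ih f (c :: cur) acc (by simpa using hf)]
        simp [h]

theorem pvSplitOn_eq (l : List Char) :
    PySem.Chars.splitOn l ['\''] = pvSplit l [] := by
  simpa using pvSplitOn_go l (l.length + 1) [] [] (by omega)

-- single-character replace is a flatMap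
theorem pvReplace_go (o : Char) (new : List Char) (l : List Char) (fuel : Nat)
    (acc : List Char) (hf : l.length ≤ fuel) :
    PySem.Chars.replace.go [o] new fuel l acc =
      acc.reverse ++ l.flatMap (fun c => if c = o then new else [c]) := by
  induction l generalizing fuel acc with
  | nil => cases fuel <;> simp [PySem.Chars.replace.go]
  | cons c rest ih =>
    cases fuel with
    | zero => simp at hf
    | succ f =>
      by_cases h : c = o
      · simp only [PySem.Chars.replace.go]
        rw [if_pos (by simp [List.isPrefixOf, h])]
        simp only [List.length_cons, List.length_nil, List.drop_succ_cons, List.drop_zero]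
        rw [ih f (new.reverse ++ acc) (by simpa using hf)]
        simp [h]
      · simp only [PySem.Chars.replace.go]
        rw [if_neg (by simp [List.isPrefixOf]; exact fun hh => h hh.symm)]
        rw [ih f (c :: acc) (by simpa using hf)]
        simp [h]

theorem pvReplace_single (o : Char) (new l : List Char) :
    PySem.Chars.replace l [o] new =
      l.flatMap (fun c => if c = o then new else [c]) := by
  simp only [PySem.Chars.replace, List.isEmpty_cons, Bool.false_eq_true, if_false]
  exact pvReplace_go o new l l.length [] le_rfl

-- the three chained replaces equal one flatMap of pvProt
theorem pvRep3_eq (seg : List Char) : pvRep3 seg = seg.flatMap pvProt := by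
  simp only [pvRep3, pvReplace_single, List.flatMap_assoc]
  congr 1; funext c
  by_cases h1 : c = '['
  · subst h1; decide
  · by_cases h2 : c = ']'
    · subst h2; decide
    · by_cases h3 : c = '='
      · subst h3; decide
      · simp [pvProt, h1, h2, h3]

-- transform at alternating positions, starting with parity b
def pvAlt (b : Bool) : List (List Char) → List (List Char)
  | [] => []
  | s :: rest => (if b then s.flatMap pvProt else s) :: pvAlt (!b) rest

theorem pvMod_two_flip (s : Int) :
    (PySem.Int.mod (s + 1) 2 == 1) = !(PySem.Int.mod s 2 == 1) := by
  rw [PySem.Int.mod_eq_emod_of_pos (by omega), PySem.Int.mod_eq_emod_of_pos (by omega)]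
  rcases Int.emod_two_eq s with h | h
  · simp [Int.add_mul_emod_self_left, Int.emod_emod_of_dvd, h]
    omega
  · simp [h]
    omega

theorem pvEnumMap (segs : List (List Char)) (s : Int) (acc : List (List Char)) :
    (PySem.List.enumerate segs s).foldl
      (fun (acc : List (List Char)) p =>
        acc ++ [if PySem.Int.mod p.1 2 == 1 then pvRep3 p.2 else p.2]) acc =
      acc ++ pvAlt (PySem.Int.mod s 2 == 1) segs := by
  induction segs generalizing s acc with
  | nil => simp [PySem.List.enumerate_nil, pvAlt]
  | cons x xs ih =>
    rw [PySem.List.enumerate_cons]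
    simp only [List.foldl_cons, pvAlt]
    rw [ih, pvMod_two_flip]
    by_cases h : (PySem.Int.mod s 2 == 1) = true <;> simp [h, pvRep3_eq]

-- joining pvAlt with the quote equals A's recursion: the central bridge
theorem pvBridge (l : List Char) (b : Bool) (cur : List Char) :
    (if b then cur.reverse.flatMap pvProt else cur.reverse) ++ pvArec b l =
      PySem.Chars.join ['\''] (pvAlt b (pvSplit l cur)) := by
  induction l generalizing b cur with
  | nil =>
    simp [pvSplit, pvAlt, pvArec, PySem.Chars.join, List.intercalate]
  | cons c rest ih =>
    by_cases h : c = '\''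
    · subst h
      have hsplit : pvSplit ('\'' :: rest) cur = cur.reverse :: pvSplit rest [] := by
        simp [pvSplit]
      have harec : pvArec b ('\'' :: rest) = '\'' :: pvArec (!b) rest := by
        simp [pvArec]
      obtain ⟨y, ys, hy⟩ : ∃ y ys, pvSplit rest ([] : List Char) = y :: ys := by
        cases hh : pvSplit rest ([] : List Char) with
        | nil => exact absurd hh (pvSplit_ne_nil rest [])
        | cons y ys => exact ⟨y, ys, rfl⟩
      have hrec := ih (!b) []
      rw [hy] at hrec
      simp only [List.reverse_nil, List.flatMap_nil, ite_self, List.nil_append] at hrec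
      rw [hsplit, harec, hy]
      simp only [pvAlt] at hrec ⊢
      rw [PySem.Chars.join_cons_cons, ← hrec]
      simp
    · simp only [pvSplit, if_neg h, pvArec]
      rw [← ih b (c :: cur)]
      by_cases hb : b <;> simp [hb, pvProt, h]

-- ===== VERDICT (by name: the statement is the Claim_ definition above) =====
theorem protect_quoted_square_brackets_and_equals_spec : Claim_equal_protect_quoted_square_brackets_and_equals := by
  intro arg _
  unfold Spec_protect_quoted_square_brackets_and_equals
  unfold protect_quoted_square_brackets_and_equals protect_quoted_square_brackets_and_equals_alt
  simp only [pvFoldA, pvSplitOn_eq, pvEnumMap]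
  have hb := pvBridge arg.toList false []
  simp only [List.reverse_nil, if_neg (Bool.false_ne_true), List.nil_append] at hb
  rw [show (PySem.Int.mod 0 2 == 1) = false from by decide, hb]
  simp
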